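-- pv_equiv track=rewrite | github.com/jungwonrs/jbnu_2025 | polynomial_commitment/pl_dl.py | index_to_filename
-- ===== SOURCE A (Python) =====
-- def index_to_filename(i: int) -> str:
--     out = []
--     while True:
--         i, r = divmod(i, 26)
--         out.append(chr(97 + r))
--         if i == 0:
--             break
--         i -= 1
--     return 'file' + ''.join(reversed(out))
-- ===== SOURCE B (Python) =====
-- def index_to_filename(i: int) -> str:
--     # Phase 1: find the digit count by skipping whole blocks of shorter names
--     # (there are 26**L names of length L); 'first' is the index of the first
--     # length-'length' name.
--     length, first = 1, 0
--     while i >= first + 26 ** length: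
--         first += 26 ** length
--         length += 1
--     # Phase 2: emit the offset within the block as a plain fixed-width
--     # base-26 numeral, most significant digit first.
--     n = i - first
--     s = ''
--     while length > 0:
--         length -= 1
--         s += chr(97 + n // 26 ** length % 26)
--     return 'file' + s
-- ===== Notes on version B (the rewrite author's own statement) =====
-- stated objective: alternative
-- what changed: Replaced A's divmod loop that appends low-order digits and reverses with a two-phase algorithm: first determine the digit count by skipping whole blocks of 26**L shorter names, then emit the offset within the block as a fixed-width base-26 numeral most-significant digit first (no list, no reversal).
import Mathlib
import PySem

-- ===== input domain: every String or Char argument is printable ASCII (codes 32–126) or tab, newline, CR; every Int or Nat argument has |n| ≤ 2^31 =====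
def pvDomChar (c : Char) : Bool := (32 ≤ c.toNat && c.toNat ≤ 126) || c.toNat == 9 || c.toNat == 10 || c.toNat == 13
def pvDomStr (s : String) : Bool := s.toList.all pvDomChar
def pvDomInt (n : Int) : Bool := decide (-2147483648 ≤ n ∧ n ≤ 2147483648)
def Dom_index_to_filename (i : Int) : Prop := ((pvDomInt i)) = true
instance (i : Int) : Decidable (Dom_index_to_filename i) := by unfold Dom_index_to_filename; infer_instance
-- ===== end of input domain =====

-- B replaces A's append-then-reverse divmod loop with a two-phase algorithm (block skipping to
-- find the digit count, then a fixed-width MSB-first base-26 numeral); alternative, same cost.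
-- Pre_ excludes negative i, on which Python A's while-loop never returns.


-- ===== PORT A =====
-- A's while-True loop with fuel; fuel i.toNat + 1 suffices for every i ≥ 0 (the quotient shrinks).
def pvLoopA (fuel : Nat) (i : Int) (out : List Char) : List Char :=
  match fuel with
  | 0 => out
  | fuel + 1 =>
    let q := PySem.Int.floordiv i 26
    let r := PySem.Int.mod i 26
    let out := out ++ [Char.ofNat (97 + r.toNat)]
    if q = 0 then out else pvLoopA fuel (q - 1) out

def index_to_filename (i : Int) : String :=
  "file" ++ String.ofList (pvLoopA (i.toNat + 1) i []).reverse

-- ===== PORT B =====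
-- Phase 1: `while i >= first + 26 ** length: first += 26 ** length; length += 1`, with fuel
-- (i.toNat + 1 iterations always suffice since `first` grows by ≥ 26 each step).
-- `length` stays ≥ 1 in the Python program, so `26 ** length` is ported as `26 ^ length.toNat`.
def pvBlocksB (fuel : Nat) (i : Int) (length : Int) (first : Int) : Int × Int :=
  match fuel with
  | 0 => (length, first)
  | fuel + 1 =>
    if first + 26 ^ length.toNat ≤ i then
      pvBlocksB fuel i (length + 1) (first + 26 ^ length.toNat)
    else (length, first)

-- Phase 2: `while length > 0: length -= 1; s += chr(97 + n // 26 ** length % 26)`;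
-- structural recursion on length.toNat, no fuel needed.
def pvDigitsB (length : Int) (n : Int) (s : List Char) : List Char :=
  if _h : 0 < length then
    pvDigitsB (length - 1) n
      (s ++ [Char.ofNat (97 + (PySem.Int.mod (PySem.Int.floordiv n (26 ^ (length - 1).toNat)) 26).toNat)])
  else s
termination_by length.toNat
decreasing_by omega

def index_to_filename_alt (i : Int) : String :=
  let lf := pvBlocksB (i.toNat + 1) i 1 0
  let n := i - lf.2
  "file" ++ String.ofList (pvDigitsB lf.1 n [])

-- ===== PRECONDITION & SPEC =====
-- Pre_ excludes i < 0: there Python A's loop never terminates (no value is returned).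
def Pre_index_to_filename (i : Int) : Prop := 0 ≤ i
instance (i : Int) : Decidable (Pre_index_to_filename i) := by unfold Pre_index_to_filename; infer_instance
def pvWitness_index_to_filename : Int := (5)
def Spec_index_to_filename (i : Int) (out : String) : Prop := out = index_to_filename_alt i
instance (i : Int) (out : String) : Decidable (Spec_index_to_filename i out) := by unfold Spec_index_to_filename; infer_instance

-- ===== CLAIM (what is proved, stated in full; the proofs are below) =====
def Claim_equal_index_to_filename : Prop := ∀ (i : Int), Dom_index_to_filename i → Pre_index_to_filename i → Spec_index_to_filename i (index_to_filename i)

-- ===== LEMMAS AND PROOFS =====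

-- Reference digit string (proof-only): bijective base-26 digits of n, most significant first.
def pvEnc (n : Nat) : List Char :=
  (if h : n < 26 then [] else pvEnc (n / 26 - 1)) ++ [Char.ofNat (97 + n % 26)]
termination_by n
decreasing_by
  have : n / 26 < n := Nat.div_lt_self (by omega) (by omega)
  omega

-- Fixed-width base-26 numeral of n, most significant digit first (proof-only).
def pvMsb (L : Nat) (n : Nat) : List Char :=
  match L with
  | 0 => []
  | L + 1 => Char.ofNat (97 + n / 26 ^ L % 26) :: pvMsb L n

-- Cumulative block starts: pvF t = number of names with at most t+? letters… pvF t = Σ_{k=1}^{t} 26^k.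
def pvF : Nat → Int
  | 0 => 0
  | t + 1 => pvF t + 26 ^ (t + 1)

lemma pvF_succ (t : Nat) : pvF (t + 1) = 26 * (pvF t + 1) := by
  induction t with
  | zero => simp [pvF]
  | succ t ih =>
    have hdef2 : pvF (t + 2) = pvF (t + 1) + 26 ^ (t + 2) := rfl
    have hdef1 : pvF (t + 1) = pvF t + 26 ^ (t + 1) := rfl
    have hp : (26 : Int) ^ (t + 2) = 26 * 26 ^ (t + 1) := by ring
    linarith [hdef2, hdef1, hp, ih]

lemma pvF_nonneg (t : Nat) : 0 ≤ pvF t := by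
  induction t with
  | zero => simp [pvF]
  | succ t ih => have : pvF (t + 1) = pvF t + 26 ^ (t + 1) := rfl
                 rw [this]; positivity

-- A's loop produces the reverse of pvEnc.
lemma pvLoopA_eq_enc (fuel : Nat) : ∀ (i : Int) (out : List Char), 0 ≤ i → i.toNat < fuel →
    pvLoopA fuel i out = out ++ (pvEnc i.toNat).reverse := by
  induction fuel with
  | zero => intro i out _ h; omega
  | succ f ih =>
    intro i out hi hf
    simp only [pvLoopA]
    have hpos : 0 < (26 : Int) := by norm_num
    have hqd : PySem.Int.floordiv i 26 = i / 26 := PySem.Int.floordiv_eq_ediv_of_pos hpos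
    have hrd : PySem.Int.mod i 26 = i % 26 := PySem.Int.mod_eq_emod_of_pos hpos
    have hin : i = (i.toNat : Int) := by omega
    have hq26 : i / 26 = ((i.toNat / 26 : Nat) : Int) := by
      rw [hin]; exact_mod_cast (Int.natCast_ediv i.toNat 26).symm
    have hr26 : i % 26 = ((i.toNat % 26 : Nat) : Int) := by
      rw [hin]; exact_mod_cast (Int.natCast_emod i.toNat 26).symm
    have hchar : Char.ofNat (97 + (PySem.Int.mod i 26).toNat) = Char.ofNat (97 + i.toNat % 26) := by
      rw [hrd, hr26, Int.toNat_natCast]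
    by_cases h0 : PySem.Int.floordiv i 26 = 0
    · have hlt : i.toNat < 26 := by
        have := h0; rw [hqd, hq26] at this
        have : i.toNat / 26 = 0 := by exact_mod_cast this
        omega
      rw [if_pos h0, pvEnc]
      simp only [hchar]
      simp [hlt]
    · have hge : 26 ≤ i.toNat := by
        by_contra h
        apply h0
        rw [hqd, hq26]
        have : i.toNat / 26 = 0 := Nat.div_eq_of_lt (by omega)
        simp [this]
      have hql : (PySem.Int.floordiv i 26 - 1) = ((i.toNat / 26 - 1 : Nat) : Int) := by
        rw [hqd, hq26]
        have : 1 ≤ i.toNat / 26 := (Nat.one_le_div_iff (by omega)).mpr hge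
        push_cast [this]; omega
      rw [if_neg h0, ih _ _ (by rw [hql]; positivity) (by rw [hql]; simp; omega)]
      conv_rhs => rw [pvEnc]
      have hnlt : ¬ i.toNat < 26 := by omega
      have hqt : (PySem.Int.floordiv i 26 - 1).toNat = i.toNat / 26 - 1 := by
        rw [hql]; exact Int.toNat_natCast _
      simp only [hchar, hqt]
      simp [hnlt]

-- Shift lemma: prepending a low digit r to m extends the fixed-width numeral on the right.
lemma pvMsb_shift (L : Nat) (m r : Nat) (hr : r < 26) :
    pvMsb (L + 1) (26 * m + r) = pvMsb L m ++ [Char.ofNat (97 + r)] := by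
  induction L with
  | zero => simp [pvMsb, Nat.mod_eq_of_lt hr]
  | succ L ih =>
    have h26 : (26 * m + r) / 26 = m := by omega
    have hd : (26 * m + r) / 26 ^ (L + 1) = m / 26 ^ L := by
      rw [pow_succ', ← Nat.div_div_eq_div_mul, h26]
    calc pvMsb (L + 2) (26 * m + r)
        = Char.ofNat (97 + (26 * m + r) / 26 ^ (L + 1) % 26) :: pvMsb (L + 1) (26 * m + r) := rfl
      _ = Char.ofNat (97 + m / 26 ^ L % 26) :: (pvMsb L m ++ [Char.ofNat (97 + r)]) := by rw [hd, ih]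
      _ = pvMsb (L + 1) m ++ [Char.ofNat (97 + r)] := rfl

-- Main: within its block, the fixed-width numeral of the offset equals the bijective digits.
lemma pvMsb_eq_enc (N : Nat) : ∀ (t : Nat), pvF t ≤ (N : Int) → (N : Int) < pvF t + 26 ^ (t + 1) →
    pvMsb (t + 1) ((N : Int) - pvF t).toNat = pvEnc N := by
  induction N using Nat.strong_induction_on with
  | _ N ih =>
    intro t hlo hhi
    match t with
    | 0 =>
      have hN : N < 26 := by simp [pvF] at hhi; exact_mod_cast hhi
      rw [pvEnc]
      simp [pvF, pvMsb, Nat.mod_eq_of_lt hN, hN]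
    | t + 1 =>
      have h26 : (26 : Int) ≤ pvF (t + 1) := by
        rw [pvF_succ]; have := pvF_nonneg t; omega
      have hNge : 26 ≤ N := by exact_mod_cast le_trans h26 hlo
      set q := N / 26 with hq
      set r := N % 26 with hr
      have hqr : N = 26 * q + r := by rw [hq, hr]; omega
      have hrlt : r < 26 := Nat.mod_lt _ (by omega)
      have hq1 : 1 ≤ q := (Nat.one_le_div_iff (by omega)).mpr hNge
      set j := q - 1 with hj
      have hjN : j < N := by omega
      have hNj : N = 26 * j + 26 + r := by omega
      -- block bounds transfer to j
      have hjlo : pvF t ≤ (j : Int) := by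
        have : (26 : Int) * (pvF t + 1) ≤ (N : Int) := by rw [← pvF_succ]; exact hlo
        have hNc : (N : Int) = 26 * (j : Int) + 26 + (r : Int) := by exact_mod_cast hNj
        have hrc : (r : Int) < 26 := by exact_mod_cast hrlt
        nlinarith
      have hjhi : (j : Int) < pvF t + 26 ^ (t + 1) := by
        have : (N : Int) < 26 * (pvF t + 1) + 26 ^ (t + 2) := by rw [← pvF_succ]; exact hhi
        have hNc : (N : Int) = 26 * (j : Int) + 26 + (r : Int) := by exact_mod_cast hNj
        have hrc : (0 : Int) ≤ (r : Int) := by positivity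
        have hp : (26 : Int) ^ (t + 2) = 26 * 26 ^ (t + 1) := by ring
        nlinarith
      have ihj := ih j hjN t hjlo hjhi
      -- offset factorisation
      have hm : ((N : Int) - pvF (t + 1)).toNat = 26 * ((j : Int) - pvF t).toNat + r := by
        rw [pvF_succ]
        have hNc : (N : Int) = 26 * (j : Int) + 26 + (r : Int) := by exact_mod_cast hNj
        omega
      rw [hm, pvMsb_shift _ _ _ hrlt, ihj]
      conv_rhs => rw [pvEnc]
      have hnlt : ¬ N < 26 := by omega
      have hjeq : N / 26 - 1 = j := rfl
      simp [hnlt, hjeq, ← hr]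

-- Phase-1 loop: from state (t+1, pvF t) it lands on the block containing i.
lemma pvBlocksB_spec (fuel : Nat) : ∀ (t : Nat) (i : Int), pvF t ≤ i →
    i < pvF t + 26 ^ (t + fuel) →
    ∃ u : Nat, t ≤ u ∧ pvBlocksB fuel i ((t : Int) + 1) (pvF t) = ((u : Int) + 1, pvF u) ∧
      pvF u ≤ i ∧ i < pvF u + 26 ^ (u + 1) := by
  induction fuel with
  | zero =>
    intro t i hlo hhi
    refine ⟨t, le_refl _, rfl, hlo, ?_⟩
    have : (26 : Int) ^ t ≤ 26 ^ (t + 1) := by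
      apply pow_le_pow_right₀ <;> omega
    simp at hhi; omega
  | succ f ih =>
    intro t i hlo hhi
    simp only [pvBlocksB]
    have htn : ((t : Int) + 1).toNat = t + 1 := by omega
    rw [htn]
    by_cases hc : pvF t + 26 ^ (t + 1) ≤ i
    · rw [if_pos hc]
      have h1 : pvF t + 26 ^ (t + 1) = pvF (t + 1) := rfl
      have h2 : ((t : Int) + 1 + 1) = (((t + 1 : Nat) : Int) + 1) := by push_cast; ring
      rw [h1, h2]
      have hhi' : i < pvF (t + 1) + 26 ^ (t + 1 + f) := by
        have hmono : pvF t ≤ pvF (t + 1) := by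
          have hd : pvF (t + 1) = pvF t + 26 ^ (t + 1) := rfl
          have hp : (0 : Int) < 26 ^ (t + 1) := by positivity
          linarith
        have he : t + (f + 1) = t + 1 + f := by omega
        rw [← he]; omega
      obtain ⟨u, hu1, hu2, hu3, hu4⟩ := ih (t + 1) i (by rw [← h1]; exact hc) hhi'
      exact ⟨u, by omega, hu2, hu3, hu4⟩
    · rw [if_neg hc]
      exact ⟨t, le_refl _, rfl, hlo, by omega⟩

-- Phase-2 loop equals the fixed-width numeral.
lemma pvDigitsB_eq_msb (L : Nat) : ∀ (n : Int) (s : List Char), 0 ≤ n →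
    pvDigitsB (L : Int) n s = s ++ pvMsb L n.toNat := by
  induction L with
  | zero => intro n s _; rw [pvDigitsB]; simp [pvMsb]
  | succ L ih =>
    intro n s hn
    rw [pvDigitsB]
    have hpos : (0 : Int) < (L : Int) + 1 := by positivity
    have hc : (0 : Int) < ((L + 1 : Nat) : Int) := by exact_mod_cast hpos
    rw [dif_pos hc]
    have h1 : (((L + 1 : Nat) : Int) - 1) = (L : Int) := by push_cast; ring
    have h2 : ((L : Int)).toNat = L := Int.toNat_natCast L
    have hppos : (0 : Int) < 26 ^ L := by positivity
    have hfd : PySem.Int.floordiv n (26 ^ L) = ((n.toNat / 26 ^ L : Nat) : Int) := by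
      rw [PySem.Int.floordiv_eq_ediv_of_pos hppos]
      have hin : n = (n.toNat : Int) := by omega
      rw [hin]
      exact_mod_cast (Int.natCast_ediv n.toNat (26 ^ L)).symm
    have hmd : PySem.Int.mod ((n.toNat / 26 ^ L : Nat) : Int) 26 = ((n.toNat / 26 ^ L % 26 : Nat) : Int) := by
      rw [PySem.Int.mod_eq_emod_of_pos (by norm_num)]
      exact_mod_cast (Int.natCast_emod (n.toNat / 26 ^ L) 26).symm
    rw [h1, h2, hfd, hmd, Int.toNat_natCast, ih n _ hn]
    simp [pvMsb]

lemma pv_lt_pow (n : Nat) : (n : Int) < 26 ^ (n + 1) := by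
  have h1 : n < 2 ^ n := Nat.lt_two_pow_self
  have h2 : 2 ^ n ≤ 26 ^ n := Nat.pow_le_pow_left (by omega) n
  have h3 : (26 : Nat) ^ n ≤ 26 ^ (n + 1) := Nat.pow_le_pow_right (by omega) (by omega)
  exact_mod_cast by omega

-- ===== VERDICT (by name: the statement is the Claim_ definition above) =====
theorem index_to_filename_spec : Claim_equal_index_to_filename := by
  intro i _ hpre
  have h0i : (0 : Int) ≤ i := hpre
  have hin : i = (i.toNat : Int) := by omega
  unfold Spec_index_to_filename index_to_filename index_to_filename_alt
  rw [pvLoopA_eq_enc (i.toNat + 1) i [] h0i (by omega)]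
  have h0 : pvF 0 = 0 := rfl
  have hhi : i < pvF 0 + 26 ^ (0 + (i.toNat + 1)) := by
    simp only [h0, Nat.zero_add]
    have hlt := pv_lt_pow i.toNat
    linarith [hin.le, hin.ge]
  obtain ⟨u, _, heq, hu3, hu4⟩ := pvBlocksB_spec (i.toNat + 1) 0 i (by rw [h0]; exact h0i) hhi
  have h1 : ((0 : Nat) : Int) + 1 = (1 : Int) := by norm_num
  rw [h1, h0] at heq
  simp only [heq]
  have hn0 : 0 ≤ i - pvF u := by linarith
  have hcast : ((u : Int) + 1) = (((u + 1 : Nat)) : Int) := by push_cast; ring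
  rw [hcast, pvDigitsB_eq_msb (u + 1) _ _ hn0]
  have hmain := pvMsb_eq_enc i.toNat u (by rw [← hin]; exact hu3) (by rw [← hin]; exact hu4)
  rw [show i - pvF u = ((i.toNat : Int)) - pvF u from by rw [← hin]] at *
  rw [hmain]
  simp
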